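-- pv_equiv track=rewrite | github.com/oyi77/berkahkarya-saas-bot | tests/e2e/bot/conftest.py | _is_error_text
-- ===== SOURCE A (Python) =====
-- from typing import Optional
--
-- def _is_error_text(text: Optional[str]) -> bool:
--     """Return True if the bot message text looks like an error response."""
--     if not text:
--         return False
--     t = text.lower()
--     return any(
--         kw in t
--         for kw in ("error", "gagal", "tidak ditemukan", "failed", "can't parse", "oops")
--     )
-- ===== SOURCE B (Python) =====
-- def _is_error_text(text):
--     """Return True if the bot message text looks like an error response."""
--     if text is None:
--         return False
--     keywords = ("error", "gagal", "tidak ditemukan", "failed", "can't parse", "oops")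
--     t = text
--     while t:
--         for kw in keywords:
--             if t[:len(kw)].lower() == kw:
--                 return True
--         t = t[1:]
--     return False
-- ===== Notes on version B (the rewrite author's own statement) =====
-- stated objective: alternative
-- what changed: B slides a window over the original text, lowercasing only the length-of-keyword prefix of each suffix and comparing it to each keyword, instead of A's one full lowercase pass followed by six independent substring-membership searches.
import Mathlib
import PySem

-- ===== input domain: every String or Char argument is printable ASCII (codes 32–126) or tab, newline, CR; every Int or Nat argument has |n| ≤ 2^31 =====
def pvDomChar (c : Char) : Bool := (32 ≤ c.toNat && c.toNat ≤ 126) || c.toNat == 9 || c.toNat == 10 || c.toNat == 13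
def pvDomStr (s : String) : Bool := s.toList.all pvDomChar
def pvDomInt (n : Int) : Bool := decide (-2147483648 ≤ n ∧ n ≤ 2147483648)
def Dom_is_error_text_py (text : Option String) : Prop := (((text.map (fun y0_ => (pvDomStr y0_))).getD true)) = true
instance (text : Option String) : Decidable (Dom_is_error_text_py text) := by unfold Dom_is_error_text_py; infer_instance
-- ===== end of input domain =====

-- B slides a window over the original text, lowercasing only the keyword-length prefix of each
-- suffix and comparing it to each keyword, instead of A's full lowercase pass followed by six
-- substring-membership searches (objective: alternative).

-- the six error keywords, shared literal data of both programs
def pvKeywords : List (List Char) :=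
  ["error".toList, "gagal".toList, "tidak ditemukan".toList, "failed".toList,
   "can't parse".toList, "oops".toList]

-- ===== PORT A =====
def is_error_text_py (text : Option String) : Bool :=
  match text with
  | none => false                       -- `if not text` catches None
  | some s =>
    if s.toList = [] then false         -- … and the empty string
    else
      let t := PySem.Chars.lower s.toList
      pvKeywords.any (fun kw => PySem.Chars.isIn kw t)   -- any(kw in t for kw in (...))

-- ===== PORT B =====
-- while t: for kw: if t[:len(kw)].lower() == kw: return True; t = t[1:]
def pvScanB : List Char → Bool
  | [] => false                         -- `while t` fails: return False
  | c :: cs =>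
    if pvKeywords.any (fun kw => PySem.Chars.lower ((c :: cs).take kw.length) = kw)
    then true
    else pvScanB cs                     -- t = t[1:]

def is_error_text_py_alt (text : Option String) : Bool :=
  match text with
  | none => false                       -- `if text is None`
  | some s => pvScanB s.toList

-- ===== PRECONDITION & SPEC =====
def Spec_is_error_text_py (text : Option String) (out : Bool) : Prop := out = is_error_text_py_alt text
instance (text : Option String) (out : Bool) : Decidable (Spec_is_error_text_py text out) := by unfold Spec_is_error_text_py; infer_instance

-- ===== CLAIM (what is proved, stated in full; the proofs are below) =====
def Claim_equal_is_error_text_py : Prop := ∀ (text : Option String), Dom_is_error_text_py text → Spec_is_error_text_py text (is_error_text_py text)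

-- ===== LEMMAS AND PROOFS =====

-- lowering a prefix-window and comparing to kw is a prefix test against the lowered text
theorem window_eq_prefix (kw t : List Char) :
    (PySem.Chars.lower (t.take kw.length) = kw) ↔ kw <+: PySem.Chars.lower t := by
  rw [List.prefix_iff_eq_take]
  unfold PySem.Chars.lower
  rw [List.map_take]
  exact eq_comm

-- B's sliding window scan finds a keyword iff some keyword is a prefix of some suffix of the lowered text
theorem pvScanB_iff (t : List Char) (h : ∀ kw ∈ pvKeywords, kw ≠ []) :
    pvScanB t = true ↔ ∃ kw ∈ pvKeywords, ∃ j, kw <+: (PySem.Chars.lower t).drop j := by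
  induction t with
  | nil =>
    simp only [pvScanB]
    constructor
    · intro hf; cases hf
    · rintro ⟨kw, hkw, j, hp⟩
      simp only [PySem.Chars.lower, List.map_nil, List.drop_nil] at hp
      exact absurd (List.prefix_nil.mp hp) (h kw hkw)
  | cons c cs ih =>
    simp only [pvScanB]
    split_ifs with hhead
    · simp only [true_iff]
      obtain ⟨kw, hkw, hp⟩ := List.any_eq_true.mp (by exact_mod_cast hhead)
      refine ⟨kw, hkw, 0, ?_⟩
      rw [List.drop_zero]
      exact (window_eq_prefix kw (c :: cs)).mp (by simpa using hp)
    · rw [ih]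
      constructor
      · rintro ⟨kw, hkw, j, hp⟩
        refine ⟨kw, hkw, j + 1, ?_⟩
        simpa [PySem.Chars.lower] using hp
      · rintro ⟨kw, hkw, j, hp⟩
        cases j with
        | zero =>
          exfalso
          rw [List.drop_zero] at hp
          exact hhead (by
            refine List.any_eq_true.mpr ⟨kw, hkw, ?_⟩
            simpa using (window_eq_prefix kw (c :: cs)).mpr hp)
        | succ j =>
          refine ⟨kw, hkw, j, ?_⟩
          simpa [PySem.Chars.lower] using hp

-- ===== VERDICT (by name: the statement is the Claim_ definition above) =====
theorem is_error_text_py_spec : Claim_equal_is_error_text_py := by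
  intro text _
  unfold Spec_is_error_text_py is_error_text_py is_error_text_py_alt
  match text with
  | none => rfl
  | some s =>
    simp only
    have hne : ∀ kw ∈ pvKeywords, kw ≠ [] := by intro kw hkw; fin_cases hkw <;> simp
    by_cases he : s.toList = []
    · rw [if_pos he, he]; rfl
    · rw [if_neg he, Bool.eq_iff_iff, List.any_eq_true]
      rw [pvScanB_iff _ hne]
      constructor
      · rintro ⟨kw, hkw, hIn⟩
        obtain ⟨j, hp⟩ := (PySem.Chars.exists_prefix_drop_iff_isIn kw _).mpr hIn
        exact ⟨kw, hkw, j, hp⟩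
      · rintro ⟨kw, hkw, j, hp⟩
        exact ⟨kw, hkw, (PySem.Chars.exists_prefix_drop_iff_isIn kw _).mp ⟨j, hp⟩⟩
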